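-- pv_equiv track=rewrite | github.com/pypi-data/pypi-mirror-404 | packages/aline-ai/aline_ai-0.7.0-py3-none-any.whl/realign/commands/watcher.py | _is_uuid_like
-- ===== SOURCE A (Python) =====
-- def _is_uuid_like(selector: str) -> bool:
--     """
--     Check if a string looks like a UUID or UUID prefix.
--
--     Deprecated: Use _is_session_id_like for broader session ID support.
--
--     Args:
--         selector: String to check
--
--     Returns:
--         True if it looks like a UUID (hex chars and dashes, at least 4 chars, contains letters)
--     """
--     selector = selector.strip().lower()
--
--     # Must have at least 4 chars
--     if len(selector) < 4:
--         return False
--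
--     # Check if it looks like a UUID (hex chars and dashes only)
--     valid_chars = set("0123456789abcdef-")
--     if not all(c in valid_chars for c in selector):
--         return False
--
--     # Must contain at least one letter to distinguish from pure numbers
--     if not any(c in "abcdef" for c in selector):
--         return False
--
--     return True
-- ===== SOURCE B (Python) =====
-- def _is_uuid_like(selector: str) -> bool:
--     """Same check as A, but one fused pass over the characters with an
--     early exit on the first invalid character and a has-letter flag,
--     instead of three separate scans (len / all / any)."""
--     s = selector.strip().lower()
--     has_letter = False
--     for c in s:
--         if c in "abcdef":
--             has_letter = True
--         elif not ("0" <= c <= "9" or c == "-"):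
--             return False
--     return len(s) >= 4 and has_letter
-- ===== Notes on version B (the rewrite author's own statement) =====
-- stated objective: alternative
-- what changed: Replaces A's three separate scans (length check, all-characters-valid scan, any-hex-letter scan) with one fused pass over the string that exits early on the first invalid character while maintaining a has-letter flag.
import Mathlib
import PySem

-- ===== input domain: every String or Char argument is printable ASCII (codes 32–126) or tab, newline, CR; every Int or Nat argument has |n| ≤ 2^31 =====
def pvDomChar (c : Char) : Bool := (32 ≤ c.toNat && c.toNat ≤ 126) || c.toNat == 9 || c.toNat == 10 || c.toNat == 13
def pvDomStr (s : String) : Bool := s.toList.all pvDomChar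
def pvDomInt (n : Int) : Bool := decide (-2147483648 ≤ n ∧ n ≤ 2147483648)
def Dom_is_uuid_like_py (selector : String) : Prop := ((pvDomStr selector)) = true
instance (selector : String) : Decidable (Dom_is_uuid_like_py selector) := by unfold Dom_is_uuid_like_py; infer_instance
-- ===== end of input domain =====

-- B replaces A's three separate scans by one fused pass with an early exit and a has-letter flag; same return value everywhere.

-- ===== PORT A =====
-- the per-character tests A performs: membership in "abcdef" and in "0123456789abcdef-"
def isHexLetter (c : Char) : Bool := decide (c ∈ ['a','b','c','d','e','f'])
def isValidA (c : Char) : Bool := decide (c ∈ ['0','1','2','3','4','5','6','7','8','9','a','b','c','d','e','f','-'])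

-- literal transliteration of A: strip+lower, then length check, then an 'all' scan, then an 'any' scan
def is_uuid_like_py (selector : String) : Bool :=
  let s := PySem.Str.lower (PySem.Str.strip selector)
  if PySem.Str.len s < 4 then false
  else if !(s.toList.all isValidA) then false
  else if !(s.toList.any isHexLetter) then false
  else true

-- ===== PORT B =====
-- Source B's per-character test '"0" <= c <= "9" or c == "-"'
def isDigitDash (c : Char) : Bool := (decide ('0' ≤ c) && decide (c ≤ '9')) || decide (c = '-')

-- the loop of Source B: 'none' = the early 'return False', 'some h' = falling out of the loop with flag h
def isUuidAltLoop : List Char → Bool → Option Bool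
  | [], h => some h
  | c :: cs, h =>
    if isHexLetter c then isUuidAltLoop cs true
    else if isDigitDash c then isUuidAltLoop cs h
    else none

def is_uuid_like_py_alt (selector : String) : Bool :=
  let s := PySem.Str.lower (PySem.Str.strip selector)
  match isUuidAltLoop s.toList false with
  | none => false
  | some h => decide (PySem.Str.len s ≥ 4) && h

-- ===== PRECONDITION & SPEC =====
def Spec_is_uuid_like_py (selector : String) (out : Bool) : Prop := out = is_uuid_like_py_alt selector
instance (selector : String) (out : Bool) : Decidable (Spec_is_uuid_like_py selector out) := by unfold Spec_is_uuid_like_py; infer_instance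

-- ===== CLAIM (what is proved, stated in full; the proofs are below) =====
def Claim_equal_is_uuid_like_py : Prop := ∀ (selector : String), Dom_is_uuid_like_py selector → Spec_is_uuid_like_py selector (is_uuid_like_py selector)

-- ===== LEMMAS AND PROOFS =====

-- per character: A's big-set membership = B's letter-or-digit-or-dash test
lemma validB_eq (c : Char) : isValidA c = (isHexLetter c || isDigitDash c) := by
  rw [Bool.eq_iff_iff]
  simp only [isValidA, isHexLetter, isDigitDash, List.mem_cons, List.not_mem_nil, or_false,
    Bool.or_eq_true, Bool.and_eq_true, decide_eq_true_eq, Char.ext_iff, Char.le_def,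
    UInt32.le_iff_toNat_le, ← UInt32.toNat_inj]
  simp
  omega

-- the fused loop, characterised: 'none' iff some char is invalid, else the flag ORed with 'any letter'
lemma isUuidAltLoop_eq (L : List Char) (h : Bool) :
    isUuidAltLoop L h =
      if L.all isValidA then some (h || L.any isHexLetter) else none := by
  induction L generalizing h with
  | nil => simp [isUuidAltLoop]
  | cons c cs ih =>
    simp only [isUuidAltLoop, List.all_cons, List.any_cons, validB_eq c]
    by_cases hl : isHexLetter c = true
    · simp [hl, ih]
    · simp only [Bool.not_eq_true] at hl
      by_cases hd : isDigitDash c = true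
      · simp [hl, hd, ih]
      · simp [hl, hd]

-- ===== VERDICT (by name: the statement is the Claim_ definition above) =====
theorem is_uuid_like_py_spec : Claim_equal_is_uuid_like_py := by
  intro selector _
  unfold Spec_is_uuid_like_py is_uuid_like_py is_uuid_like_py_alt
  generalize PySem.Str.lower (PySem.Str.strip selector) = s
  simp only [isUuidAltLoop_eq]
  by_cases hall : (s.toList.all isValidA) = true
  · rw [if_pos hall]
    by_cases hlen : PySem.Str.len s < 4
    · have h4 : s.length < 4 := by simp [PySem.Str.len_eq] at hlen; omega
      simp [h4]
    · simp only [if_neg hlen, hall, Bool.not_true, Bool.false_or]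
      have h4 : 4 ≤ s.length := by simp [PySem.Str.len_eq] at hlen; omega
      by_cases hany : (s.toList.any isHexLetter) = true
      · simp [hany, h4]
      · simp only [Bool.not_eq_true] at hany
        simp [hany]
  · simp only [Bool.not_eq_true] at hall
    by_cases hlen : PySem.Str.len s < 4 <;> simp [hlen, hall]
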